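-- pv_equiv track=rewrite | github.com/luxcas213/pruebas-proyecto | modelo/index.py | optimizarMatrix
-- ===== SOURCE A (Python) =====
-- import copy
--
-- def tieneVecinoCero(x, y, z, matrix):
--     n = len(matrix)
--     direcciones = [(1, 0, 0), (-1, 0, 0), (0, 1, 0), (0, -1, 0), (0, 0, 1), (0, 0, -1)]
--
--     for dx, dy, dz in direcciones:
--         auxX = x + dx
--         auxY = y + dy
--         auxZ = z + dz
--         if 0 <= auxX < n and 0 <= auxY < n and 0 <= auxZ < n:
--             if matrix[auxX][auxY][auxZ] == 0:
--                 return True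
--         else:
--             return True
--     return False
--
-- def optimizarMatrix(matrix):
--     n = len(matrix)
--     matrixAUX = copy.deepcopy(matrix)
--     for x in range(n):
--         for y in range(n):
--             for z in range(n):
--                 if matrix[x][y][z] == 1:
--                     if not tieneVecinoCero(x, y, z, matrix):
--                         matrixAUX[x][y][z] = 0
--     return matrixAUX
-- ===== SOURCE B (Python) =====
-- import copy
--
-- _DIRS = [(1, 0, 0), (-1, 0, 0), (0, 1, 0), (0, -1, 0), (0, 0, 1), (0, 0, -1)]
--
-- def optimizarMatrix(matrix):
--     n = len(matrix)
--     res = copy.deepcopy(matrix)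
--     protected = set()
--     for x in range(n):
--         for y in range(n):
--             for z in range(n):
--                 if x == 0 or y == 0 or z == 0 or x == n - 1 or y == n - 1 or z == n - 1:
--                     protected.add((x, y, z))
--                 if matrix[x][y][z] == 0:
--                     for dx, dy, dz in _DIRS:
--                         nx, ny, nz = x + dx, y + dy, z + dz
--                         if 0 <= nx < n and 0 <= ny < n and 0 <= nz < n:
--                             protected.add((nx, ny, nz))
--     for x in range(n):
--         for y in range(n):
--             for z in range(n):
--                 if matrix[x][y][z] == 1 and (x, y, z) not in protected:
--                     res[x][y][z] = 0
--     return res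
-- ===== Notes on version B (the rewrite author's own statement) =====
-- stated objective: alternative
-- what changed: Instead of testing all six neighbors of every 1-cell (A), B pushes protection forward: one pass marks boundary cells and the in-bounds neighbors of every 0-cell as protected in a set, a second pass clears every unprotected 1-cell.
import Mathlib
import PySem

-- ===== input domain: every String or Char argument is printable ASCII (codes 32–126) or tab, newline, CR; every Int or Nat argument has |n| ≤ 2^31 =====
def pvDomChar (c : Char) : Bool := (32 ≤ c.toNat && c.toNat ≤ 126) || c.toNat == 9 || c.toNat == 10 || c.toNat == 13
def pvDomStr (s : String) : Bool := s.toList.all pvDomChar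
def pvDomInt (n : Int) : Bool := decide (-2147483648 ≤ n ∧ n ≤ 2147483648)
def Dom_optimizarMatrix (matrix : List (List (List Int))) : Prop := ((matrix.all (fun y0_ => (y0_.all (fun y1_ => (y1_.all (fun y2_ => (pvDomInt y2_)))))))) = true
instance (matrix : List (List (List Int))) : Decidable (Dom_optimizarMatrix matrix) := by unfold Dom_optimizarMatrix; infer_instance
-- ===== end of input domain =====

-- B replaces A's per-1-cell six-neighbor scan by a "push protection from zeros" pass
-- (mark boundary cells and in-bounds neighbors of 0-cells as protected, then clear
-- unprotected 1-cells); objective: alternative decomposition, same O(n^3) cost.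
-- Neither program mutates its argument (A and B deepcopy); equality is about the return value.

-- shared accessors: matrix[x][y][z] (total via default; Pre_ keeps all accesses in range)
def mget (m : List (List (List Int))) (x y z : Int) : Int :=
  PySem.List.pyGetD (PySem.List.pyGetD (PySem.List.pyGetD m x []) y []) z 0

-- res[x][y][z] = v (indices are in [0, n) wherever used)
def set3 (m : List (List (List Int))) (x y z : Int) (v : Int) : List (List (List Int)) :=
  m.modify x.toNat (fun p => p.modify y.toNat (fun r => r.set z.toNat v))

def pvDirs : List (Int × Int × Int) :=
  [(1, 0, 0), (-1, 0, 0), (0, 1, 0), (0, -1, 0), (0, 0, 1), (0, 0, -1)]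

-- 0 <= x < n and 0 <= y < n and 0 <= z < n
def inb3 (n x y z : Int) : Bool := decide (0 ≤ x ∧ x < n ∧ 0 ≤ y ∧ y < n ∧ 0 ≤ z ∧ z < n)

-- ===== PORT A =====
def tieneVecinoCero (x y z : Int) (matrix : List (List (List Int))) : Bool :=
  let n : Int := matrix.length
  pvDirs.any (fun d =>
    let auxX := x + d.1
    let auxY := y + d.2.1
    let auxZ := z + d.2.2
    if inb3 n auxX auxY auxZ then mget matrix auxX auxY auxZ == 0
    else true)

def optimizarMatrix (matrix : List (List (List Int))) : List (List (List Int)) :=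
  let n : Int := matrix.length
  (PySem.List.pyRange 0 n 1).foldl (fun a1 x =>
    (PySem.List.pyRange 0 n 1).foldl (fun a2 y =>
      (PySem.List.pyRange 0 n 1).foldl (fun a3 z =>
        if mget matrix x y z == 1 then
          if tieneVecinoCero x y z matrix then a3 else set3 a3 x y z 0
        else a3) a2) a1) matrix

-- ===== PORT B =====
def isBoundary (n x y z : Int) : Bool :=
  x == 0 || y == 0 || z == 0 || x == n - 1 || y == n - 1 || z == n - 1

def addCell (n : Int) (matrix : List (List (List Int))) (x y z : Int)
    (s : PySem.Set (Int × Int × Int)) : PySem.Set (Int × Int × Int) :=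
  let s1 := if isBoundary n x y z then PySem.Set.add s (x, y, z) else s
  if mget matrix x y z == 0 then
    pvDirs.foldl (fun s2 d =>
      if inb3 n (x + d.1) (y + d.2.1) (z + d.2.2) then
        PySem.Set.add s2 (x + d.1, y + d.2.1, z + d.2.2)
      else s2) s1
  else s1

def protSet (n : Int) (matrix : List (List (List Int))) : PySem.Set (Int × Int × Int) :=
  (PySem.List.pyRange 0 n 1).foldl (fun s x =>
    (PySem.List.pyRange 0 n 1).foldl (fun s y =>
      (PySem.List.pyRange 0 n 1).foldl (fun s z =>
        addCell n matrix x y z s) s) s) PySem.Set.empty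

def optimizarMatrix_alt (matrix : List (List (List Int))) : List (List (List Int)) :=
  let n : Int := matrix.length
  let prot := protSet n matrix
  (PySem.List.pyRange 0 n 1).foldl (fun a1 x =>
    (PySem.List.pyRange 0 n 1).foldl (fun a2 y =>
      (PySem.List.pyRange 0 n 1).foldl (fun a3 z =>
        if mget matrix x y z == 1 && !(PySem.Set.contains prot (x, y, z)) then
          set3 a3 x y z 0
        else a3) a2) a1) matrix

-- ===== PRECONDITION & SPEC =====
-- Pre_ excludes exactly the ragged inputs on which Python A raises IndexError: every
-- plane must have at least n = len(matrix) rows and each of its first n rows at least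
-- n entries (A indexes only coordinates below n).
def Pre_optimizarMatrix (matrix : List (List (List Int))) : Prop :=
  ∀ p ∈ matrix, matrix.length ≤ p.length ∧ ∀ r ∈ p.take matrix.length, matrix.length ≤ r.length
instance (matrix : List (List (List Int))) : Decidable (Pre_optimizarMatrix matrix) := by
  unfold Pre_optimizarMatrix; infer_instance

def pvWitness_optimizarMatrix : List (List (List Int)) := [[[1]]]

def Spec_optimizarMatrix (matrix : List (List (List Int))) (out : List (List (List Int))) : Prop := out = optimizarMatrix_alt matrix
instance (matrix : List (List (List Int))) (out : List (List (List Int))) : Decidable (Spec_optimizarMatrix matrix out) := by unfold Spec_optimizarMatrix; infer_instance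

-- ===== CLAIM (what is proved, stated in full; the proofs are below) =====
def Claim_equal_optimizarMatrix : Prop := ∀ (matrix : List (List (List Int))), Dom_optimizarMatrix matrix → Pre_optimizarMatrix matrix → Spec_optimizarMatrix matrix (optimizarMatrix matrix)

-- ===== LEMMAS AND PROOFS =====

-- contribution of cell (x,y,z) of the first pass to the protected set at point p
def Contrib (n : Int) (m : List (List (List Int))) (x y z : Int) (p : Int × Int × Int) : Prop :=
  (isBoundary n x y z = true ∧ p = (x, y, z)) ∨
  (mget m x y z = 0 ∧ ∃ d, d ∈ pvDirs ∧ inb3 n (x + d.1) (y + d.2.1) (z + d.2.2) = true ∧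
    p = (x + d.1, y + d.2.1, z + d.2.2))

lemma mem_foldl_cond_add {β : Type} (p : Int × Int × Int) (L : List β)
    (P : β → Bool) (g : β → Int × Int × Int) :
    ∀ s : PySem.Set (Int × Int × Int),
      p ∈ L.foldl (fun s2 d => if P d then PySem.Set.add s2 (g d) else s2) s ↔
        p ∈ s ∨ ∃ d, d ∈ L ∧ P d = true ∧ p = g d := by
  induction L with
  | nil => simp
  | cons hd tl ih =>
    intro s
    rw [List.foldl_cons, ih]
    constructor
    · rintro (h | ⟨d, hdl, hP, hpe⟩)
      · by_cases hphd : P hd = true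
        · rw [hphd, if_pos rfl, PySem.Set.mem_add] at h
          rcases h with h | h
          · exact Or.inl h
          · exact Or.inr ⟨hd, List.mem_cons_self, hphd, h⟩
        · rw [if_neg (by simpa using hphd)] at h
          exact Or.inl h
      · exact Or.inr ⟨d, List.mem_cons_of_mem _ hdl, hP, hpe⟩
    · rintro (h | ⟨d, hdl, hP, hpe⟩)
      · left
        split
        · rw [PySem.Set.mem_add]; exact Or.inl h
        · exact h
      · rcases List.mem_cons.mp hdl with rfl | hdl
        · left
          rw [hP, if_pos rfl, PySem.Set.mem_add]
          exact Or.inr hpe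
        · exact Or.inr ⟨d, hdl, hP, hpe⟩

lemma mem_ite_add (p q : Int × Int × Int) (b : Bool) (s : PySem.Set (Int × Int × Int)) :
    p ∈ (if b then PySem.Set.add s q else s) ↔ p ∈ s ∨ (b = true ∧ p = q) := by
  cases b
  · simp
  · simp [PySem.Set.mem_add]

lemma mem_addCell (n : Int) (m : List (List (List Int))) (x y z : Int)
    (s : PySem.Set (Int × Int × Int)) (p : Int × Int × Int) :
    p ∈ addCell n m x y z s ↔ p ∈ s ∨ Contrib n m x y z p := by
  unfold addCell Contrib
  by_cases h0 : mget m x y z = 0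
  · rw [if_pos (by simpa using h0), mem_foldl_cond_add, mem_ite_add]
    constructor
    · rintro ((h | h) | ⟨d, hd⟩)
      · exact Or.inl h
      · exact Or.inr (Or.inl h)
      · exact Or.inr (Or.inr ⟨h0, d, hd⟩)
    · rintro (h | h | ⟨_, d, hd⟩)
      · exact Or.inl (Or.inl h)
      · exact Or.inl (Or.inr h)
      · exact Or.inr ⟨d, hd⟩
  · rw [if_neg (by simpa using h0), mem_ite_add]
    constructor
    · rintro (h | h)
      · exact Or.inl h
      · exact Or.inr (Or.inl h)
    · rintro (h | h | ⟨h, _⟩)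
      · exact Or.inl h
      · exact Or.inr h
      · exact absurd h h0

lemma mem_foldl_of_step {β : Type} (p : Int × Int × Int) (L : List β)
    (f : PySem.Set (Int × Int × Int) → β → PySem.Set (Int × Int × Int)) (Q : β → Prop)
    (h : ∀ s x, p ∈ f s x ↔ p ∈ s ∨ Q x) :
    ∀ s, p ∈ L.foldl f s ↔ p ∈ s ∨ ∃ x, x ∈ L ∧ Q x := by
  induction L with
  | nil => simp
  | cons hd tl ih =>
    intro s
    rw [List.foldl_cons, ih, h]
    constructor
    · rintro ((h1 | h1) | ⟨x, hx, hq⟩)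
      · exact Or.inl h1
      · exact Or.inr ⟨hd, List.mem_cons_self, h1⟩
      · exact Or.inr ⟨x, List.mem_cons_of_mem _ hx, hq⟩
    · rintro (h1 | ⟨x, hx, hq⟩)
      · exact Or.inl (Or.inl h1)
      · rcases List.mem_cons.mp hx with rfl | hx
        · exact Or.inl (Or.inr hq)
        · exact Or.inr ⟨x, hx, hq⟩

lemma mem_protSet (n : Int) (m : List (List (List Int))) (p : Int × Int × Int) :
    p ∈ protSet n m ↔
      ∃ x, x ∈ PySem.List.pyRange 0 n 1 ∧ ∃ y, y ∈ PySem.List.pyRange 0 n 1 ∧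
        ∃ z, z ∈ PySem.List.pyRange 0 n 1 ∧ Contrib n m x y z p := by
  unfold protSet
  rw [mem_foldl_of_step p _ _
    (fun x => ∃ y, y ∈ PySem.List.pyRange 0 n 1 ∧ ∃ z, z ∈ PySem.List.pyRange 0 n 1 ∧
      Contrib n m x y z p)
    (fun s x => mem_foldl_of_step p _ _
      (fun y => ∃ z, z ∈ PySem.List.pyRange 0 n 1 ∧ Contrib n m x y z p)
      (fun s y => mem_foldl_of_step p _ _
        (fun z => Contrib n m x y z p)
        (fun s z => mem_addCell n m x y z s p) s) s)]
  simp [PySem.Set.empty]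

-- A's test, unfolded to an existential over the six directions
lemma tiene_iff (m : List (List (List Int))) (a b c : Int) :
    tieneVecinoCero a b c m = true ↔
      ∃ d, d ∈ pvDirs ∧ (¬ inb3 (m.length : Int) (a + d.1) (b + d.2.1) (c + d.2.2) = true ∨
        mget m (a + d.1) (b + d.2.1) (c + d.2.2) = 0) := by
  unfold tieneVecinoCero
  rw [List.any_eq_true]
  constructor
  · rintro ⟨d, hd, h⟩
    refine ⟨d, hd, ?_⟩
    by_cases hin : inb3 (m.length : Int) (a + d.1) (b + d.2.1) (c + d.2.2) = true
    · right
      rw [if_pos hin] at h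
      simpa using h
    · exact Or.inl hin
  · rintro ⟨d, hd, h⟩
    refine ⟨d, hd, ?_⟩
    by_cases hin : inb3 (m.length : Int) (a + d.1) (b + d.2.1) (c + d.2.2) = true
    · rcases h with h | h
      · exact absurd hin h
      · rw [if_pos hin]; simpa using h
    · rw [if_neg hin]

-- the crux: for an in-range cell, membership in the protected set is exactly A's test
lemma prot_iff_tiene (m : List (List (List Int))) (a b c : Int)
    (ha : 0 ≤ a ∧ a < (m.length : Int)) (hb : 0 ≤ b ∧ b < (m.length : Int))
    (hc : 0 ≤ c ∧ c < (m.length : Int)) :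
    ((a, b, c) ∈ protSet (m.length : Int) m ↔ tieneVecinoCero a b c m = true) := by
  rw [mem_protSet, tiene_iff]
  constructor
  · rintro ⟨x, hx, y, hy, z, hz, hcon⟩
    rw [PySem.List.mem_pyRange_one] at hx hy hz
    rcases hcon with ⟨hbd, heq⟩ | ⟨h0, d, hd, hin, heq⟩
    · -- boundary cell: (a,b,c) = (x,y,z); pick the escaping direction
      obtain ⟨rfl, rfl, rfl⟩ : x = a ∧ y = b ∧ z = c := by
        simpa [Prod.ext_iff, eq_comm] using heq
      simp only [isBoundary, Bool.or_eq_true, beq_iff_eq] at hbd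
      rcases hbd with ((((h | h) | h) | h) | h) | h
      · exact ⟨(-1, 0, 0), by simp [pvDirs], Or.inl (by simp [inb3]; omega)⟩
      · exact ⟨(0, -1, 0), by simp [pvDirs], Or.inl (by simp [inb3]; omega)⟩
      · exact ⟨(0, 0, -1), by simp [pvDirs], Or.inl (by simp [inb3]; omega)⟩
      · exact ⟨(1, 0, 0), by simp [pvDirs], Or.inl (by simp [inb3]; omega)⟩
      · exact ⟨(0, 1, 0), by simp [pvDirs], Or.inl (by simp [inb3]; omega)⟩
      · exact ⟨(0, 0, 1), by simp [pvDirs], Or.inl (by simp [inb3]; omega)⟩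
    · -- neighbor of a zero cell: the opposite direction leads back to it
      simp only [pvDirs, List.mem_cons, List.not_mem_nil, or_false] at hd
      have heq' : a = x + d.1 ∧ b = y + d.2.1 ∧ c = z + d.2.2 := by
        simpa [Prod.ext_iff] using heq
      obtain ⟨rfl, rfl, rfl⟩ := heq'
      rcases hd with rfl | rfl | rfl | rfl | rfl | rfl <;>
        [exact ⟨(-1, 0, 0), by simp [pvDirs], Or.inr (by simpa using h0)⟩;
         exact ⟨(1, 0, 0), by simp [pvDirs], Or.inr (by simpa using h0)⟩;
         exact ⟨(0, -1, 0), by simp [pvDirs], Or.inr (by simpa using h0)⟩;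
         exact ⟨(0, 1, 0), by simp [pvDirs], Or.inr (by simpa using h0)⟩;
         exact ⟨(0, 0, -1), by simp [pvDirs], Or.inr (by simpa using h0)⟩;
         exact ⟨(0, 0, 1), by simp [pvDirs], Or.inr (by simpa using h0)⟩]
  · rintro ⟨d, hd, hcase⟩
    simp only [pvDirs, List.mem_cons, List.not_mem_nil, or_false] at hd
    have houtcase : ¬ inb3 (m.length : Int) (a + d.1) (b + d.2.1) (c + d.2.2) = true →
        ∃ x, x ∈ PySem.List.pyRange 0 (m.length : Int) 1 ∧
          ∃ y, y ∈ PySem.List.pyRange 0 (m.length : Int) 1 ∧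
            ∃ z, z ∈ PySem.List.pyRange 0 (m.length : Int) 1 ∧
              Contrib (m.length : Int) m x y z (a, b, c) := by
      -- out-of-bounds neighbor: (a,b,c) itself is a boundary cell
      intro hout
      simp only [inb3, decide_eq_true_eq] at hout
      refine ⟨a, ?_, b, ?_, c, ?_, Or.inl ⟨?_, rfl⟩⟩
      · rw [PySem.List.mem_pyRange_one]; omega
      · rw [PySem.List.mem_pyRange_one]; omega
      · rw [PySem.List.mem_pyRange_one]; omega
      · simp only [isBoundary, Bool.or_eq_true, beq_iff_eq]
        rcases hd with rfl | rfl | rfl | rfl | rfl | rfl <;> (simp at hout; omega)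
    rcases hcase with hout | h0
    · exact houtcase hout
    · by_cases hio : inb3 (m.length : Int) (a + d.1) (b + d.2.1) (c + d.2.2) = true
      · -- in-bounds zero neighbor: that cell contributes with the opposite direction
        simp only [inb3, decide_eq_true_eq] at hio
        have hmem : ∀ u : Int, 0 ≤ u → u < (m.length : Int) →
            u ∈ PySem.List.pyRange 0 (m.length : Int) 1 := by
          intro u h1 h2
          rw [PySem.List.mem_pyRange_one]; omega
        have hinb : inb3 (m.length : Int) a b c = true := by
          simp only [inb3, decide_eq_true_eq]; omega
        rcases hd with rfl | rfl | rfl | rfl | rfl | rfl <;> simp at hio h0 ⊢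
        · exact ⟨a+1, ⟨by omega, by omega⟩, b, ⟨by omega, by omega⟩, c,
            ⟨by omega, by omega⟩,
            Or.inr ⟨h0, (-1,0,0), by simp [pvDirs], by simpa using hinb, by simp⟩⟩
        · exact ⟨a-1, ⟨by omega, by omega⟩, b, ⟨by omega, by omega⟩, c,
            ⟨by omega, by omega⟩,
            Or.inr ⟨h0, (1,0,0), by simp [pvDirs], by simpa using hinb, by simp⟩⟩
        · exact ⟨a, ⟨by omega, by omega⟩, b+1, ⟨by omega, by omega⟩, c,
            ⟨by omega, by omega⟩,
            Or.inr ⟨h0, (0,-1,0), by simp [pvDirs], by simpa using hinb, by simp⟩⟩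
        · exact ⟨a, ⟨by omega, by omega⟩, b-1, ⟨by omega, by omega⟩, c,
            ⟨by omega, by omega⟩,
            Or.inr ⟨h0, (0,1,0), by simp [pvDirs], by simpa using hinb, by simp⟩⟩
        · exact ⟨a, ⟨by omega, by omega⟩, b, ⟨by omega, by omega⟩, c+1,
            ⟨by omega, by omega⟩,
            Or.inr ⟨h0, (0,0,-1), by simp [pvDirs], by simpa using hinb, by simp⟩⟩
        · exact ⟨a, ⟨by omega, by omega⟩, b, ⟨by omega, by omega⟩, c-1,
            ⟨by omega, by omega⟩,
            Or.inr ⟨h0, (0,0,1), by simp [pvDirs], by simpa using hinb, by simp⟩⟩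
      · exact houtcase hio

-- per-cell equality of the two fold bodies, then congruence over the three ranges
lemma folds_eq (matrix : List (List (List Int))) :
    optimizarMatrix matrix = optimizarMatrix_alt matrix := by
  unfold optimizarMatrix optimizarMatrix_alt
  apply PySem.List.foldl_congr_mem
  intro a1 x hx
  apply PySem.List.foldl_congr_mem
  intro a2 y hy
  apply PySem.List.foldl_congr_mem
  intro a3 z hz
  rw [PySem.List.mem_pyRange_one] at hx hy hz
  have hcont : PySem.Set.contains (protSet (matrix.length : Int) matrix) (x, y, z) =
      tieneVecinoCero x y z matrix := by
    have h := prot_iff_tiene matrix x y z ⟨hx.1, hx.2⟩ ⟨hy.1, hy.2⟩ ⟨hz.1, hz.2⟩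
    rw [← PySem.Set.contains_iff] at h
    cases hcv : PySem.Set.contains (protSet (matrix.length : Int) matrix) (x, y, z)
    · cases htv : tieneVecinoCero x y z matrix
      · rfl
      · rw [hcv, htv] at h; simpa using h.mpr rfl
    · cases htv : tieneVecinoCero x y z matrix
      · rw [hcv, htv] at h; simpa using h.mp rfl
      · rfl
  rw [hcont]
  by_cases h1 : mget matrix x y z == 1
  · cases htv : tieneVecinoCero x y z matrix
    · simp [h1]
    · simp [h1]
  · simp [h1]

-- ===== VERDICT (by name: the statement is the Claim_ definition above) =====
theorem optimizarMatrix_spec : Claim_equal_optimizarMatrix := by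
  intro matrix _ _
  unfold Spec_optimizarMatrix
  exact folds_eq matrix
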